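-- pv_equiv track=rewrite | github.com/openeuler-mirror/test-tools | auto-tc-gen/help_parse/parse_options_parameters.py | get_brackets
-- ===== SOURCE A (Python) =====
-- def get_brackets(left, right, s):
--     """
--         统计括号不匹配时出现的次数差值
--
--         Args:
--             left ([int]): [左侧位置]
--             right ([int]): [右侧位置]
--             s ([string]): [command字符串]
--
--         Returns:
--             [int]: 次数差值
--     """
--     nums = 0
--     for i in range(0, len(s)):
--         if s[i].__eq__(left):
--             nums = nums + 1
--         if s[i].__eq__(right):
--             nums = nums - 1
--         if nums < 0:
--             return -999
--     return nums
-- ===== SOURCE B (Python) =====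
-- def get_brackets(left, right, s):
--     deltas = [(c == left) - (c == right) for c in s]
--     prefix = []
--     total = 0
--     for d in deltas:
--         total += d
--         prefix.append(total)
--     if not prefix:
--         return 0
--     return -999 if min(prefix) < 0 else prefix[-1]
-- ===== Notes on version B (the rewrite author's own statement) =====
-- stated objective: alternative
-- what changed: Replaces A's single early-exit counting loop with three separate phases: map each character to a +/-1 delta via a comprehension, build the full prefix-sum list, then decide by min(prefix) < 0 and return the last prefix sum.
import Mathlib
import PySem

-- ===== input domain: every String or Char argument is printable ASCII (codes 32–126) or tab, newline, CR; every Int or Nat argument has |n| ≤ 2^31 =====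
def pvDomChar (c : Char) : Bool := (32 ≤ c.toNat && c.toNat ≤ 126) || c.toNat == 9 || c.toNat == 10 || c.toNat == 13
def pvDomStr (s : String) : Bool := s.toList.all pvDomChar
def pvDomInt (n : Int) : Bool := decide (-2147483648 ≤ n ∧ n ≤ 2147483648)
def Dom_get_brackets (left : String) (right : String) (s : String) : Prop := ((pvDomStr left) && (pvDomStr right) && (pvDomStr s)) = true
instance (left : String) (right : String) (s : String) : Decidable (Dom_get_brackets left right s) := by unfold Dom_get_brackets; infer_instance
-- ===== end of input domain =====

-- B replaces A's single early-exit counting loop with three phases: per-char deltas,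
-- a prefix-sum list, then a min-check and the last prefix sum (objective: alternative).

-- ===== PORT A =====
-- A's loop over i in range(len(s)): s[i] == left / == right (string equality of a
-- one-char string with the argument), early return -999 when nums < 0.
def getBracketsLoopA (l r : List Char) : List Char → Int → Int
  | [], nums => nums
  | c :: cs, nums =>
    let n1 := if [c] = l then nums + 1 else nums
    let n2 := if [c] = r then n1 - 1 else n1
    if n2 < 0 then -999 else getBracketsLoopA l r cs n2

def get_brackets (left : String) (right : String) (s : String) : Int :=
  getBracketsLoopA left.toList right.toList s.toList 0

-- ===== PORT B =====
-- prefix-sum accumulator of Source B's second loop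
def getBracketsAccum : List Int → Int → List Int
  | [], _ => []
  | d :: ds, total => (total + d) :: getBracketsAccum ds (total + d)

def get_brackets_alt (left : String) (right : String) (s : String) : Int :=
  let l := left.toList
  let r := right.toList
  let deltas := s.toList.map fun c =>
    (if [c] = l then (1 : Int) else 0) - (if [c] = r then 1 else 0)
  match getBracketsAccum deltas 0 with
  | [] => 0
  | x :: xs => if List.foldl min x xs < 0 then -999 else List.foldl (fun _ y => y) x xs

-- ===== PRECONDITION & SPEC =====
def Spec_get_brackets (left : String) (right : String) (s : String) (out : Int) : Prop := out = get_brackets_alt left right s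
instance (left : String) (right : String) (s : String) (out : Int) : Decidable (Spec_get_brackets left right s out) := by unfold Spec_get_brackets; infer_instance

-- ===== CLAIM (what is proved, stated in full; the proofs are below) =====
def Claim_equal_get_brackets : Prop := ∀ (left : String) (right : String) (s : String), Dom_get_brackets left right s → Spec_get_brackets left right s (get_brackets left right s)

-- ===== LEMMAS AND PROOFS =====

-- running minimum of the prefix sums starting from n
def getBracketsMinpre : List Int → Int → Int
  | [], n => n
  | d :: ds, n => min (n + d) (getBracketsMinpre ds (n + d))

theorem loopA_eq (l r : List Char) :
    ∀ (cs : List Char) (n : Int), 0 ≤ n →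
      getBracketsLoopA l r cs n =
        (if getBracketsMinpre (cs.map fun c =>
              (if [c] = l then (1 : Int) else 0) - (if [c] = r then 1 else 0)) n < 0
         then -999
         else n + (cs.map fun c =>
              (if [c] = l then (1 : Int) else 0) - (if [c] = r then 1 else 0)).sum) := by
  intro cs
  induction cs with
  | nil => intro n hn; simp [getBracketsLoopA, getBracketsMinpre]; omega
  | cons c cs ih =>
    intro n hn
    simp only [getBracketsLoopA, List.map_cons, getBracketsMinpre, List.sum_cons]
    set d : Int := (if [c] = l then (1 : Int) else 0) - (if [c] = r then 1 else 0) with hd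
    have hn2 : (let n1 := if [c] = l then n + 1 else n;
                if [c] = r then n1 - 1 else n1) = n + d := by
      simp only [hd]; split_ifs <;> ring
    rw [hn2]
    by_cases h : n + d < 0
    · simp only [if_pos h]
      have : min (n + d) (getBracketsMinpre (cs.map fun c =>
          (if [c] = l then (1 : Int) else 0) - (if [c] = r then 1 else 0)) (n + d)) < 0 := by
        have := min_le_left (n + d) (getBracketsMinpre (cs.map fun c =>
          (if [c] = l then (1 : Int) else 0) - (if [c] = r then 1 else 0)) (n + d))
        omega
      rw [if_pos this]
    · simp only [if_neg h]
      rw [ih (n + d) (by omega)]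
      have hmle : min (n + d) (getBracketsMinpre (cs.map fun c =>
          (if [c] = l then (1 : Int) else 0) - (if [c] = r then 1 else 0)) (n + d)) < 0 ↔
          getBracketsMinpre (cs.map fun c =>
          (if [c] = l then (1 : Int) else 0) - (if [c] = r then 1 else 0)) (n + d) < 0 := by
        constructor <;> intro hh
        · rcases lt_or_ge (n + d) (getBracketsMinpre (cs.map fun c =>
            (if [c] = l then (1 : Int) else 0) - (if [c] = r then 1 else 0)) (n + d)) with h1 | h1
          · rw [min_eq_left (le_of_lt h1)] at hh; omega
          · rw [min_eq_right h1] at hh; exact hh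
        · have := min_le_right (n + d) (getBracketsMinpre (cs.map fun c =>
            (if [c] = l then (1 : Int) else 0) - (if [c] = r then 1 else 0)) (n + d))
          omega
      split_ifs with h1 h2 h2
      · rfl
      · exact absurd (hmle.mpr h1) h2
      · exact absurd (hmle.mp h2) h1
      · ring

theorem accum_min (ds : List Int) : ∀ (a n : Int), a ≤ n →
    List.foldl min a (getBracketsAccum ds n) = min a (getBracketsMinpre ds n) := by
  induction ds with
  | nil => intro a n h; simp [getBracketsAccum, getBracketsMinpre]; omega
  | cons d ds ih =>
    intro a n h
    simp only [getBracketsAccum, getBracketsMinpre, List.foldl_cons]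
    rw [ih (min a (n + d)) (n + d) (min_le_right _ _), min_assoc]

theorem accum_last (ds : List Int) : ∀ (x n : Int),
    List.foldl (fun _ y => y) x (getBracketsAccum ds n) =
      if ds.isEmpty then x else n + ds.sum := by
  induction ds with
  | nil => intro x n; simp [getBracketsAccum]
  | cons d ds ih =>
    intro x n
    simp only [getBracketsAccum, List.foldl_cons, List.sum_cons, List.isEmpty_cons]
    rw [ih]
    cases ds with
    | nil => simp
    | cons e es => simp only [List.isEmpty_cons]; simp; ring

-- ===== VERDICT (by name: the statement is the Claim_ definition above) =====
theorem get_brackets_spec : Claim_equal_get_brackets := by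
  intro left right s _
  unfold Spec_get_brackets get_brackets get_brackets_alt
  rw [loopA_eq left.toList right.toList s.toList 0 (le_refl 0)]
  cases hs : s.toList with
  | nil => simp [getBracketsAccum, getBracketsMinpre]
  | cons c cs =>
    simp only [List.map_cons, getBracketsAccum, getBracketsMinpre, List.sum_cons]
    rw [accum_min _ _ _ (le_refl _), accum_last]
    generalize (List.map (fun c => ((if [c] = left.toList then (1:Int) else 0) - if [c] = right.toList then 1 else 0)) cs) = ms
    cases ms with
    | nil => simp only [getBracketsMinpre, List.sum_nil, List.isEmpty_nil]; split_ifs <;> omega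
    | cons e es =>
      simp only [List.isEmpty_cons, Bool.false_eq_true, if_false]
      split_ifs <;> omega
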